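-- pv_equiv track=rewrite | github.com/HeadHunter483/msu-ling | Syntax/Codes/python/morph.py | partcp_morph
-- ===== SOURCE A (Python) =====
-- def partcp_morph(string):
--     str5=""
--     word = string.split()
--     mas=[]
--     mas2=[]
--
--     for current_word in word:
--         mas.append(current_word.lower())
--
--     while(len(mas2)!=8):
--         mas2.append("-")
--
--     for s in mas:
--         if (s=='pf' or s=='ipf'): #вид
--             mas2[0]=s
--         if (s=='praes' or s=='praet' or s=='fut'): #время
--             mas2[1]=s
--         if (s=='nom' or s=='gen' or s=='dat' or s=='acc' or s=='ins' or s=='loc'):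
--             mas2[2]=s
--         if (s=='sg' or s=='pl'): #число
--             mas2[3]=s
--         if (s=='plen' or s=='brev'): #полное или краткое
--             mas2[4]=s
--         if (s=='f' or s=='m' or s=='n'): #род
--             mas2[5]=s
--         if (s=='act' or s=='pass'):
--             mas2[6]=s
--
--     i=0
--     for i in range(len(mas2)):
--         str5=str5+' '+mas2[i]
--
--     return str5
--
-- i=0
-- ===== SOURCE B (Python) =====
-- CATS = [
--     ["pf", "ipf"],
--     ["praes", "praet", "fut"],
--     ["nom", "gen", "dat", "acc", "ins", "loc"],
--     ["sg", "pl"],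
--     ["plen", "brev"],
--     ["f", "m", "n"],
--     ["act", "pass"],
--     [],
-- ]
--
-- def partcp_morph(string):
--     tokens = [w.lower() for w in string.split()]
--     return ''.join(
--         ' ' + next((t for t in reversed(tokens) if t in cat), '-')
--         for cat in CATS
--     )
-- ===== Notes on version B (the rewrite author's own statement) =====
-- stated objective: simpler
-- what changed: Replaces the single token pass with a 7-branch cascade mutating an 8-slot list by a per-category reversed scan: for each category set (in slot order) take the last token belonging to it, defaulting to a dash, and join with leading spaces.
import Mathlib
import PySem

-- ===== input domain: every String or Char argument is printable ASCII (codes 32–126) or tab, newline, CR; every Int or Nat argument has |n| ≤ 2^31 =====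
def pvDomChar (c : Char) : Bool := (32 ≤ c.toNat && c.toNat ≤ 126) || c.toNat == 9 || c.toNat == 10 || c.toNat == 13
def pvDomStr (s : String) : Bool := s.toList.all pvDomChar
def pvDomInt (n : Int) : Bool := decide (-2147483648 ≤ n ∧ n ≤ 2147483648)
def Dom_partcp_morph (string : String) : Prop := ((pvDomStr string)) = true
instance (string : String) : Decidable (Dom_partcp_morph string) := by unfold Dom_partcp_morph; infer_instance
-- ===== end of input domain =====

-- B replaces A's single token pass mutating an 8-slot list through a branch cascade
-- by a per-category reversed scan (last matching token per category, default "-"); objective: simpler.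


-- ===== PORT A =====
-- the body of A's 'for s in mas' loop: seven independent if-statements assigning slots
def pvStepA (m : List String) (s : String) : List String :=
  let m := if s == "pf" || s == "ipf" then m.set 0 s else m
  let m := if s == "praes" || s == "praet" || s == "fut" then m.set 1 s else m
  let m := if s == "nom" || s == "gen" || s == "dat" || s == "acc" || s == "ins" || s == "loc" then m.set 2 s else m
  let m := if s == "sg" || s == "pl" then m.set 3 s else m
  let m := if s == "plen" || s == "brev" then m.set 4 s else m
  let m := if s == "f" || s == "m" || s == "n" then m.set 5 s else m
  let m := if s == "act" || s == "pass" then m.set 6 s else m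
  m

def partcp_morph (string : String) : String :=
  let word := PySem.Str.split₀ string
  let mas := word.foldl (fun acc w => acc ++ [PySem.Str.lower w]) []
  let mas2 := List.replicate 8 "-"          -- the while-append loop fills 8 dashes
  let mas2 := mas.foldl pvStepA mas2
  (List.range mas2.length).foldl (fun str5 i => str5 ++ " " ++ mas2.getD i "") ""

-- ===== PORT B =====
def pvCats : List (List String) :=
  [["pf", "ipf"], ["praes", "praet", "fut"],
   ["nom", "gen", "dat", "acc", "ins", "loc"], ["sg", "pl"],
   ["plen", "brev"], ["f", "m", "n"], ["act", "pass"], []]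

def partcp_morph_alt (string : String) : String :=
  let tokens := (PySem.Str.split₀ string).map PySem.Str.lower
  String.join (pvCats.map (fun cat =>
    " " ++ ((tokens.reverse.find? (fun t => cat.contains t)).getD "-")))

-- ===== PRECONDITION & SPEC =====
def Spec_partcp_morph (string : String) (out : String) : Prop := out = partcp_morph_alt string
instance (string : String) (out : String) : Decidable (Spec_partcp_morph string out) := by unfold Spec_partcp_morph; infer_instance

-- ===== CLAIM (what is proved, stated in full; the proofs are below) =====
def Claim_equal_partcp_morph : Prop := ∀ (string : String), Dom_partcp_morph string → Spec_partcp_morph string (partcp_morph string)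

-- ===== LEMMAS AND PROOFS =====

-- B's per-category value on the processed tokens
def pvLastB (ts : List String) (cat : List String) : String :=
  (ts.reverse.find? (fun t => cat.contains t)).getD "-"

theorem pvLastB_snoc (ts : List String) (t : String) (cat : List String) :
    pvLastB (ts ++ [t]) cat = if cat.contains t then t else pvLastB ts cat := by
  simp [pvLastB, List.find?]
  split <;> simp_all

-- one A-step on a state of the B-shape equals the pointwise B-update
theorem pvStepA_map (g : List String → String) (t : String) :
    pvStepA (pvCats.map g) t =
      pvCats.map (fun c => if c.contains t then t else g c) := by
  by_cases h : t ∈ (["pf", "ipf", "praes", "praet", "fut", "nom", "gen", "dat", "acc",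
      "ins", "loc", "sg", "pl", "plen", "brev", "f", "m", "n", "act", "pass"] : List String)
  · fin_cases h <;> rfl
  · simp only [List.mem_cons, List.not_mem_nil, or_false, not_or] at h
    obtain ⟨h1, h2, h3, h4, h5, h6, h7, h8, h9, h10, h11, h12, h13, h14, h15, h16, h17, h18, h19, h20⟩ := h
    simp [pvStepA, pvCats, h1, h2, h3, h4, h5, h6, h7, h8, h9, h10,
      h11, h12, h13, h14, h15, h16, h17, h18, h19, h20]

-- the whole A fold computes B's per-category values
theorem pvFold_eq (ts : List String) :
    ts.foldl pvStepA (List.replicate 8 "-") = pvCats.map (pvLastB ts) := by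
  induction ts using List.reverseRecOn with
  | nil => rfl
  | append_singleton ts t ih =>
      rw [List.foldl_append, List.foldl_cons, List.foldl_nil, ih, pvStepA_map]
      congr 1
      funext c
      rw [pvLastB_snoc]

-- the append-building loop of A equals B's map/foldl accumulation
theorem pvMas_eq (w : List String) :
    w.foldl (fun acc x => acc ++ [PySem.Str.lower x]) [] = w.map PySem.Str.lower := by
  have h : ∀ (acc : List String),
      w.foldl (fun acc x => acc ++ [PySem.Str.lower x]) acc = acc ++ w.map PySem.Str.lower := by
    induction w with
    | nil => simp
    | cons x xs ih => intro acc; simp [List.foldl_cons, ih]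
  simpa using h []

-- ===== VERDICT (by name: the statement is the Claim_ definition above) =====
theorem partcp_morph_spec : Claim_equal_partcp_morph := by
  intro string _
  show partcp_morph string = partcp_morph_alt string
  simp only [partcp_morph, partcp_morph_alt]
  rw [pvMas_eq, pvFold_eq]
  simp only [pvCats, List.map, List.length_cons, List.length_nil, List.range_succ,
    List.range_zero, List.foldl, List.getD, String.join]
  simp [pvLastB, String.append_assoc]
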